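-- pv_equiv track=rewrite | github.com/garylyp/vector-space-model | search.py | remove_duplicate_not
-- ===== SOURCE A (Python) =====
-- def remove_duplicate_not(tokens):
--     """
--     Remove duplicate NOT operators to avoid situations like 'NOT NOT NOT x', which is simply equivalent to 'NOT x'
--     """
--     not_count = 0
--     duplicates_removed_list = []
--     for token in tokens:
--         if token == 'NOT':
--             not_count += 1
--             if not_count == 2:
--                 duplicates_removed_list.pop()
--                 not_count = 0
--             else:
--                 duplicates_removed_list.append(token)
--         else:
--             not_count = 0
--             duplicates_removed_list.append(token)
--
--     return duplicates_removed_list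
-- ===== SOURCE B (Python) =====
-- def remove_duplicate_not(tokens):
--     """Run-length: each maximal run of consecutive 'NOT's collapses to
--     run_length % 2 'NOT's; other tokens pass through unchanged."""
--     out = []
--     i = 0
--     n = len(tokens)
--     while i < n:
--         if tokens[i] == 'NOT':
--             j = i
--             while j < n and tokens[j] == 'NOT':
--                 j += 1
--             if (j - i) % 2 == 1:
--                 out.append('NOT')
--             i = j
--         else:
--             out.append(tokens[i])
--             i += 1
--     return out
-- ===== Notes on version B (the rewrite author's own statement) =====
-- stated objective: alternative
-- what changed: Replaces A's per-token pair-cancellation with a counter by a run-length algorithm: B scans each maximal run of consecutive 'NOT's in one inner scan and emits run_length % 2 'NOT's (a closed form for the whole run), passing other tokens through.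
import Mathlib
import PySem

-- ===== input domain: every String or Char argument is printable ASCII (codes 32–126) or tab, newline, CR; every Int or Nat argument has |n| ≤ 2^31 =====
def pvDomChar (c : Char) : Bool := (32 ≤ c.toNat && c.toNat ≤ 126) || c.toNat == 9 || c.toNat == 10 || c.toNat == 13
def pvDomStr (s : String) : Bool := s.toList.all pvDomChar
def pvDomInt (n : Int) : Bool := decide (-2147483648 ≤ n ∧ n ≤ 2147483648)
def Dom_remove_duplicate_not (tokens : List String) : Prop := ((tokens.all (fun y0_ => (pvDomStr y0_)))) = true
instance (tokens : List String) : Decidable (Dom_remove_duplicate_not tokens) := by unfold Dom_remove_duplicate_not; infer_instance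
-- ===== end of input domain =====

-- B replaces A's per-token counter cancellation by a run-length algorithm: each maximal run of k consecutive "NOT"s is emitted as k % 2 "NOT"s (objective: alternative).


-- ===== PORT A =====
def stepA (s : Int × List String) (token : String) : Int × List String :=
  if token = "NOT" then
    if s.1 + 1 = 2 then (0, s.2.dropLast)
    else (s.1 + 1, s.2 ++ [token])
  else (0, s.2 ++ [token])

def remove_duplicate_not (tokens : List String) : List String :=
  (tokens.foldl stepA (0, [])).2

-- ===== PORT B =====
-- the outer while-loop of Source B as structural recursion on the remaining suffix;
-- the inner run-scan (j advancing over "NOT"s) is takeWhile/dropWhile on that suffix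
def altGo : List String → List String
  | [] => []
  | t :: ts =>
    if t = "NOT" then
      (if ((t :: ts).takeWhile (· == "NOT")).length % 2 = 1 then ["NOT"] else [])
        ++ altGo ((t :: ts).dropWhile (· == "NOT"))
    else t :: altGo ts
termination_by l => l.length
decreasing_by
  · rename_i ht
    subst ht
    simp only [List.dropWhile_cons, List.length_cons]
    rw [if_pos (by simp)]
    exact Nat.lt_succ_of_le (List.length_dropWhile_le _ ts)
  · simp

def remove_duplicate_not_alt (tokens : List String) : List String := altGo tokens

-- ===== PRECONDITION & SPEC =====
def Spec_remove_duplicate_not (tokens : List String) (out : List String) : Prop := out = remove_duplicate_not_alt tokens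
instance (tokens : List String) (out : List String) : Decidable (Spec_remove_duplicate_not tokens out) := by unfold Spec_remove_duplicate_not; infer_instance

-- ===== CLAIM (what is proved, stated in full; the proofs are below) =====
def Claim_equal_remove_duplicate_not : Prop := ∀ (tokens : List String), Dom_remove_duplicate_not tokens → Spec_remove_duplicate_not tokens (remove_duplicate_not tokens)

-- ===== LEMMAS AND PROOFS =====

-- A on a run of k "NOT"s from state (0, acc): returns to parity state, net effect k % 2 "NOT"s
lemma runA (k : ℕ) : ∀ acc : List String,
    List.foldl stepA (0, acc) (List.replicate k "NOT")
      = (((k % 2 : ℕ) : Int), acc ++ List.replicate (k % 2) "NOT") := by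
  induction k using Nat.twoStepInduction with
  | zero => intro acc; simp
  | one => intro acc; simp [stepA]
  | more k ih _ =>
    intro acc
    have h2 : List.replicate (k + 2) "NOT" = "NOT" :: "NOT" :: List.replicate k "NOT" := rfl
    rw [h2]
    simp only [List.foldl_cons]
    have s1 : stepA (0, acc) "NOT" = (1, acc ++ ["NOT"]) := by simp [stepA]
    have s2 : stepA (1, acc ++ ["NOT"]) "NOT" = (0, acc) := by simp [stepA]
    rw [s1, s2, ih acc]
    simp [Nat.add_mod_right]

-- a fold of A starting in counter state 1 equals one in state 0 when the next token is not "NOT"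
lemma foldA_one_eq_zero (r : String) (rs : List String) (x : List String) (hr : r ≠ "NOT") :
    List.foldl stepA (1, x) (r :: rs) = List.foldl stepA (0, x) (r :: rs) := by
  simp only [List.foldl_cons]
  have : ∀ c : Int, stepA (c, x) r = (0, x ++ [r]) := by intro c; simp [stepA, hr]
  rw [this 1, this 0]

lemma main (n : ℕ) : ∀ tokens : List String, tokens.length ≤ n → ∀ acc : List String,
    (List.foldl stepA (0, acc) tokens).2 = acc ++ altGo tokens := by
  induction n with
  | zero =>
    intro tokens h acc
    have : tokens = [] := List.eq_nil_of_length_eq_zero (Nat.le_zero.mp h)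
    subst this; simp [altGo]
  | succ n ih =>
    intro tokens h acc
    match tokens with
    | [] => simp [altGo]
    | t :: ts =>
      by_cases ht : t = "NOT"
      · subst ht
        -- split off the maximal leading run of "NOT"s
        set run := ("NOT" :: ts).takeWhile (· == "NOT") with hrun
        set rest := ("NOT" :: ts).dropWhile (· == "NOT") with hrest
        have hsplit : "NOT" :: ts = run ++ rest := (List.takeWhile_append_dropWhile).symm
        have hrepl : run = List.replicate run.length "NOT" := by
          apply List.eq_replicate_of_mem
          intro a ha
          have := List.mem_takeWhile_imp (hrun ▸ ha)
          simpa using this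
        have hlen1 : 1 ≤ run.length := by
          rw [hrun]; simp
        have hrun' : run.length = (ts.takeWhile (· == "NOT")).length + 1 := by
          rw [hrun]; simp
        have hrest' : rest = ts.dropWhile (· == "NOT") := by
          rw [hrest]; simp
        have hrest_len : rest.length ≤ n := by
          have h1 : ts.length + 1 ≤ n + 1 := by simpa using h
          have h2 : (ts.takeWhile (· == "NOT")).length + rest.length = ts.length := by
            rw [hrest']
            conv_rhs => rw [← List.takeWhile_append_dropWhile (p := (· == "NOT")) (l := ts)]
            rw [List.length_append]
          omega
        have hfold : List.foldl stepA (0, acc) ("NOT" :: ts)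
            = List.foldl stepA ((run.length % 2 : ℕ), acc ++ List.replicate (run.length % 2) "NOT") rest := by
          rw [hsplit, List.foldl_append]
          congr 1
          conv_lhs => rw [hrepl]
          exact runA run.length acc
        have haltGo : altGo ("NOT" :: ts)
            = (if run.length % 2 = 1 then ["NOT"] else []) ++ altGo rest := by
          rw [altGo, hrun', hrest']; simp
        rw [hfold, haltGo]
        rcases Nat.mod_two_eq_zero_or_one run.length with hpar | hpar
        · rw [hpar]
          simp only [List.replicate_zero, List.append_nil, Nat.cast_zero]
          rw [ih rest hrest_len acc]
          simp
        · rw [hpar]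
          simp only [List.replicate_one, Nat.cast_one]
          have hrest_head : ∀ r rs, rest = r :: rs → r ≠ "NOT" := by
            intro r rs hr hcontra
            have := List.head?_dropWhile_not (· == "NOT") ("NOT" :: ts)
            rw [← hrest, hr] at this
            simp [hcontra] at this
          match hrm : rest with
          | [] => simp [altGo]
          | r :: rs =>
            have hr : r ≠ "NOT" := hrest_head r rs rfl
            rw [foldA_one_eq_zero r rs (acc ++ ["NOT"]) hr]
            rw [ih (r :: rs) hrest_len (acc ++ ["NOT"])]
            simp
      · have s0 : stepA (0, acc) t = (0, acc ++ [t]) := by simp [stepA, ht]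
        simp only [List.foldl_cons, s0]
        rw [ih ts (Nat.le_of_succ_le_succ h) (acc ++ [t])]
        rw [altGo]
        simp [ht]

-- ===== VERDICT (by name: the statement is the Claim_ definition above) =====
theorem remove_duplicate_not_spec : Claim_equal_remove_duplicate_not := by
  intro tokens _
  unfold Spec_remove_duplicate_not remove_duplicate_not remove_duplicate_not_alt
  simpa using main tokens.length tokens le_rfl []
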